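-- pv_equiv track=rewrite | github.com/kmin1231/algorithm_problems | Python3/프로그래머스/0/120864. 숨어있는 숫자의 덧셈 （2）/숨어있는 숫자의 덧셈 （2）.py | solution
-- ===== SOURCE A (Python) =====
-- def solution(my_string):
--     answer = 0
--     current_num = ""
--
--     for char in my_string:
--         if char in "0123456789":
--             current_num += char
--         else:
--             if current_num:
--                 answer += int(current_num)
--                 current_num = ""
--     if current_num: answer += int(current_num)
--
--     return answer
-- ===== SOURCE B (Python) =====
-- import re
--
-- def solution(my_string):
--     return sum(int(n) for n in re.findall(r'[0-9]+', my_string))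
-- ===== Notes on version B (the rewrite author's own statement) =====
-- stated objective: idiomatic
-- what changed: Replaced the manual character-by-character scan with pending-number state by a regex tokenization into maximal digit runs followed by a separate summation pass.
import Mathlib
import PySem

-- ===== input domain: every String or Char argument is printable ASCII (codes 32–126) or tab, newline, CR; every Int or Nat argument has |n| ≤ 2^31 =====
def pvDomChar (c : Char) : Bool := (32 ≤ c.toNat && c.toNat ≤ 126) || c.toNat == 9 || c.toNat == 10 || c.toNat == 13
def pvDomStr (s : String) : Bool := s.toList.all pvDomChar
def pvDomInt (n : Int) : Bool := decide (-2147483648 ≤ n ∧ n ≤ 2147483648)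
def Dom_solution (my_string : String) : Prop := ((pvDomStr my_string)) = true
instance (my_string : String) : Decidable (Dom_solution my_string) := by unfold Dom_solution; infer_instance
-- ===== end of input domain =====

-- B replaces A's single scan with pending-number state by a regex tokenization into
-- maximal digit runs followed by a separate summation pass (objective: idiomatic).

-- ===== PORT A =====
-- char in "0123456789"
def solDig (c : Char) : Bool := PySem.Chars.isIn [c] ("0123456789".toList)

-- int(current_num) for nonempty digit current_num (ofChars? is always `some` there)
def solVal (cur : List Char) : Int := (PySem.Int.ofChars? cur).getD 0

-- the for-loop: state (answer, current_num)
def solLoop : Int × List Char → List Char → Int × List Char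
  | st, [] => st
  | (ans, cur), c :: cs =>
      if solDig c then solLoop (ans, cur ++ [c]) cs
      else solLoop ((if cur ≠ [] then ans + solVal cur else ans), []) cs

-- the final `if current_num: answer += int(current_num)`
def solFlush : Int × List Char → Int
  | (ans, cur) => if cur ≠ [] then ans + solVal cur else ans

def solution (my_string : String) : Int :=
  solFlush (solLoop (0, []) my_string.toList)

-- ===== PORT B =====
-- the regex class [0-9]
def digB (c : Char) : Bool := decide ('0' ≤ c ∧ c ≤ '9')

-- re.findall(r'[0-9]+', s): the maximal digit runs, left to right
def findRuns : List Char → List (List Char)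
  | [] => []
  | c :: cs =>
      if digB c then (c :: cs.takeWhile digB) :: findRuns (cs.dropWhile digB)
      else findRuns cs
termination_by l => l.length
decreasing_by
  · simpa using Nat.lt_succ_of_le (List.length_dropWhile_le _ _)
  · simp

-- sum(int(n) for n in …)
def solution_alt (my_string : String) : Int :=
  ((findRuns my_string.toList).map (fun r => (PySem.Int.ofChars? r).getD 0)).sum

-- ===== PRECONDITION & SPEC =====
def Spec_solution (my_string : String) (out : Int) : Prop := out = solution_alt my_string
instance (my_string : String) (out : Int) : Decidable (Spec_solution my_string out) := by unfold Spec_solution; infer_instance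

-- ===== CLAIM (what is proved, stated in full; the proofs are below) =====
def Claim_equal_solution : Prop := ∀ (my_string : String), Dom_solution my_string → Spec_solution my_string (solution my_string)

-- ===== LEMMAS AND PROOFS =====

-- the two digit tests agree on every character
lemma dig_eq (c : Char) : solDig c = digB c := by
  have hds : "0123456789".toList = ['0','1','2','3','4','5','6','7','8','9'] := by decide
  have hA : solDig c = true ↔ c ∈ ['0','1','2','3','4','5','6','7','8','9'] := by
    unfold solDig
    rw [PySem.Chars.isIn_iff_infix, hds, List.singleton_infix_iff]
  have hB : digB c = true ↔ c ∈ ['0','1','2','3','4','5','6','7','8','9'] := by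
    unfold digB
    simp only [decide_eq_true_eq, Char.le_def, UInt32.le_iff_toNat_le]
    constructor
    · intro ⟨h1, h2⟩
      have h1' : 48 ≤ c.val.toNat := h1
      have h2' : c.val.toNat ≤ 57 := h2
      have : c.val.toNat = 48 ∨ c.val.toNat = 49 ∨ c.val.toNat = 50 ∨ c.val.toNat = 51 ∨
          c.val.toNat = 52 ∨ c.val.toNat = 53 ∨ c.val.toNat = 54 ∨ c.val.toNat = 55 ∨
          c.val.toNat = 56 ∨ c.val.toNat = 57 := by omega
      have hc : ∀ (d : Char), c.val.toNat = d.val.toNat → c = d := by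
        intro d hd
        exact Char.ext (UInt32.toNat_inj.mp hd)
      rcases this with h|h|h|h|h|h|h|h|h|h
      · simp [hc '0' h]
      · simp [hc '1' h]
      · simp [hc '2' h]
      · simp [hc '3' h]
      · simp [hc '4' h]
      · simp [hc '5' h]
      · simp [hc '6' h]
      · simp [hc '7' h]
      · simp [hc '8' h]
      · simp [hc '9' h]
    · intro h
      fin_cases h <;> decide
  rw [Bool.eq_iff_iff, hA, hB]

-- runs of A's loop, phrased with a pending partial run `cur`
def runsP : List Char → List Char → List (List Char)
  | cur, [] => if cur ≠ [] then [cur] else []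
  | cur, c :: cs =>
      if digB c then runsP (cur ++ [c]) cs
      else (if cur ≠ [] then cur :: runsP [] cs else runsP [] cs)

-- A's loop computes the sum of the values of the pending runs
lemma solLoop_runsP : ∀ (cs : List Char) (ans : Int) (cur : List Char),
    solFlush (solLoop (ans, cur) cs) = ans + ((runsP cur cs).map solVal).sum := by
  intro cs
  induction cs with
  | nil =>
      intro ans cur
      by_cases h : cur = [] <;> simp [solLoop, solFlush, runsP, h]
  | cons c cs ih =>
      intro ans cur
      by_cases hc : digB c
      · simp [solLoop, runsP, dig_eq, hc, ih]
      · by_cases h : cur = [] <;>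
          simp [solLoop, runsP, dig_eq, hc, h, ih, add_assoc]

-- the pending-run decomposition is exactly the maximal-run tokenization
lemma runsP_eq_findRuns : ∀ (n : Nat) (l : List Char), l.length ≤ n →
    runsP [] l = findRuns l ∧
    ∀ cur, cur ≠ [] →
      runsP cur l = (cur ++ l.takeWhile digB) :: findRuns (l.dropWhile digB) := by
  intro n
  induction n with
  | zero =>
      intro l h
      have : l = [] := List.length_eq_zero_iff.mp (Nat.le_zero.mp h)
      subst this
      refine ⟨by simp [runsP, findRuns], fun cur hcur => by simp [runsP, findRuns, hcur]⟩
  | succ n ih =>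
      intro l h
      cases l with
      | nil =>
          refine ⟨by simp [runsP, findRuns], fun cur hcur => by simp [runsP, findRuns, hcur]⟩
      | cons c cs =>
          have hcs : cs.length ≤ n := by simpa using h
          constructor
          · by_cases hc : digB c
            · rw [runsP, if_pos hc]
              simp only [List.nil_append]
              rw [(ih cs hcs).2 [c] (by simp)]
              simp [findRuns, hc]
            · rw [runsP, if_neg hc]
              simp [findRuns, hc, (ih cs hcs).1]
          · intro cur hcur
            by_cases hc : digB c
            · rw [runsP, if_pos hc, (ih cs hcs).2 (cur ++ [c]) (by simp)]
              simp [hc]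
            · rw [runsP, if_neg hc, if_pos hcur, (ih cs hcs).1]
              simp [findRuns, hc]

-- ===== VERDICT (by name: the statement is the Claim_ definition above) =====
theorem solution_spec : Claim_equal_solution := by
  intro s _
  unfold Spec_solution solution solution_alt
  rw [solLoop_runsP, (runsP_eq_findRuns s.toList.length s.toList le_rfl).1]
  simp only [zero_add]
  unfold solVal
  rfl
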